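-- pv_equiv track=rewrite | github.com/nathiss/AdventOfCode | 2019/day04/python/main.py | hasDecreasing
-- ===== SOURCE A (Python) =====
-- def hasDecreasing(i):
--   current = i % 10
--   while i > 0:
--     i = i // 10
--     if i % 10 > current:
--       return True
--     current = i % 10
--   return False
-- ===== SOURCE B (Python) =====
-- def hasDecreasing(i):
--   if i <= 0:
--     return False
--   s = str(i)
--   return any(a > b for a, b in zip(s, s[1:]))
-- ===== Notes on version B (the rewrite author's own statement) =====
-- stated objective: idiomatic
-- what changed: B converts the number to its decimal string once and checks adjacent character pairs left-to-right with any/zip, instead of peeling digits right-to-left with floor-division and modulo while tracking a running 'current' digit.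
import Mathlib
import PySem

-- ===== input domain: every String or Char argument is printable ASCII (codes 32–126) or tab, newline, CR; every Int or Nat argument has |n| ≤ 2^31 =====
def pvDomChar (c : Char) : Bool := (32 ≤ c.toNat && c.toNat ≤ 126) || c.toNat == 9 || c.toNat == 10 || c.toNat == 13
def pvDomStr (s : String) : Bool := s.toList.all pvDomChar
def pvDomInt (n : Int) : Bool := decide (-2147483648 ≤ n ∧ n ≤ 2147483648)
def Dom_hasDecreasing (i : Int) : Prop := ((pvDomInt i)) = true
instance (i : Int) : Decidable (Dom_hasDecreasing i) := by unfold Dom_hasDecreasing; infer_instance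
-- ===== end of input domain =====

-- B checks adjacent characters of str(i) left-to-right instead of peeling digits
-- with // and % while tracking a running `current` digit: more idiomatic, same cost.

-- ===== PORT A =====
-- the while loop of A, state = (i, current)
def hdLoop (i current : Int) : Bool :=
  if _h : 0 < i then
    let i' := PySem.Int.floordiv i 10
    if current < PySem.Int.mod i' 10 then true
    else hdLoop i' (PySem.Int.mod i' 10)
  else false
termination_by i.toNat
decreasing_by
  have h10 : Int.fdiv i 10 = i / 10 := by rw [Int.fdiv_eq_ediv]; simp
  simp only [PySem.Int.floordiv, h10]
  omega

def hasDecreasing (i : Int) : Bool := hdLoop i (PySem.Int.mod i 10)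

-- ===== PORT B =====
def hasDecreasing_alt (i : Int) : Bool :=
  if i ≤ 0 then false
  else
    let cs := (PySem.Int.toStr i).toList
    (cs.zip cs.tail).any (fun p => decide (p.2 < p.1))

-- ===== PRECONDITION & SPEC =====
def Spec_hasDecreasing (i : Int) (out : Bool) : Prop := out = hasDecreasing_alt i
instance (i : Int) (out : Bool) : Decidable (Spec_hasDecreasing i out) := by unfold Spec_hasDecreasing; infer_instance

-- ===== CLAIM (what is proved, stated in full; the proofs are below) =====
def Claim_equal_hasDecreasing : Prop := ∀ (i : Int), Dom_hasDecreasing i → Spec_hasDecreasing i (hasDecreasing i)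

-- ===== LEMMAS AND PROOFS =====

-- decimal digit characters of n, most significant first (the value of `str` on positives)
def chs (n : Nat) : List Char :=
  if _h : n < 10 then [Nat.digitChar n] else chs (n / 10) ++ [Nat.digitChar (n % 10)]
termination_by n
decreasing_by exact Nat.div_lt_self (by omega) (by omega)

lemma chs_ne_nil (n : Nat) : chs n ≠ [] := by
  unfold chs; split <;> simp

lemma chs_getLast (n : Nat) (h : chs n ≠ []) : (chs n).getLast h = Nat.digitChar (n % 10) := by
  revert h; unfold chs; split
  · intro h
    simp [Nat.mod_eq_of_lt (by omega)]
  · intro h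
    exact List.getLast_concat

lemma toDigitsCore_eq (fuel : Nat) : ∀ (n : Nat) (ds : List Char), n < fuel →
    Nat.toDigitsCore 10 fuel n ds = chs n ++ ds := by
  induction fuel with
  | zero => intro n ds h; omega
  | succ fuel ih =>
    intro n ds h
    rw [Nat.toDigitsCore]
    by_cases h10 : n < 10
    · rw [if_pos (Nat.div_eq_of_lt h10)]
      conv_rhs => rw [chs]
      simp [h10, Nat.mod_eq_of_lt h10]
    · rw [if_neg (by omega)]
      rw [ih (n / 10) _ (by omega)]
      conv_rhs => rw [chs]
      simp [h10]

lemma toDigits_eq (n : Nat) : Nat.toDigits 10 n = chs n := by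
  rw [Nat.toDigits, toDigitsCore_eq (n + 1) n [] (by omega)]
  simp

-- digitChar is order-reflecting/preserving on digits
lemma digitChar_lt_iff : ∀ a < 10, ∀ b < 10,
    ((Nat.digitChar a < Nat.digitChar b) ↔ a < b) := by decide

-- zip-adjacent any over xs ++ [c]
lemma zipAny_append_singleton (f : Char × Char → Bool) :
    ∀ (xs : List Char) (c : Char) (h : xs ≠ []),
    (((xs ++ [c]).zip (xs ++ [c]).tail).any f) =
      (((xs.zip xs.tail).any f) || f (xs.getLast h, c)) := by
  intro xs
  induction xs with
  | nil => intro c h; exact absurd rfl h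
  | cons a t ih =>
    intro c h
    cases t with
    | nil => simp [List.zip]
    | cons b t' =>
      have := ih c (by simp)
      simp only [List.cons_append, List.tail_cons, List.zip_cons_cons, List.any_cons] at *
      rw [this]
      simp [List.getLast, Bool.or_assoc]

-- the reference digit predicate, most convenient for both sides
def decN (n : Nat) : Bool :=
  if _h : n < 10 then false else (decide (n % 10 < n / 10 % 10)) || decN (n / 10)
termination_by n
decreasing_by exact Nat.div_lt_self (by omega) (by omega)

lemma zipAny_chs (n : Nat) :
    ((chs n).zip (chs n).tail).any (fun p => decide (p.2 < p.1)) = decN n := by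
  induction n using Nat.strong_induction_on with
  | _ n ih =>
    rw [chs, decN]
    by_cases h10 : n < 10
    · simp [h10, List.zip]
    · rw [dif_neg h10, dif_neg h10]
      rw [zipAny_append_singleton _ (chs (n / 10)) _ (chs_ne_nil _)]
      rw [ih (n / 10) (Nat.div_lt_self (by omega) (by omega))]
      rw [chs_getLast]
      simp only [digitChar_lt_iff (n % 10) (by omega) (n / 10 % 10) (by omega)]
      rw [Bool.or_comm]

-- A's loop computes decN on positives
lemma hdLoop_eq (n : Nat) : ∀ (i : Int), 0 < i → i.toNat = n →
    hdLoop i (PySem.Int.mod i 10) = decN n := by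
  induction n using Nat.strong_induction_on with
  | _ n ih =>
    intro i hi hn
    rw [hdLoop.eq_def, dif_pos hi]
    have hfd : PySem.Int.floordiv i 10 = i / 10 := by
      rw [PySem.Int.floordiv, Int.fdiv_eq_ediv]; simp
    have hfm : ∀ a : Int, PySem.Int.mod a 10 = a % 10 := by
      intro a; rw [PySem.Int.mod, Int.fmod_eq_emod]; simp
    simp only [hfd, hfm]
    rw [decN]
    by_cases h10 : n < 10
    · have hi0 : i / 10 = 0 := by omega
      rw [dif_pos h10]
      rw [if_neg (by omega)]
      rw [hdLoop.eq_def]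
      rw [dif_neg (by omega)]
    · rw [dif_neg h10]
      have hlt : (n % 10 : Int) < (n / 10 % 10 : Int) ↔ (n % 10 < n / 10 % 10) := by
        constructor <;> intro h <;> omega
      have heq1 : i % 10 = (n % 10 : Int) := by omega
      have heq2 : i / 10 % 10 = ((n / 10 % 10 : Nat) : Int) := by omega
      rw [heq1, heq2]
      by_cases hc : (n % 10 : Nat) < n / 10 % 10
      · rw [if_pos (by exact_mod_cast hc)]
        simp [hc]
      · rw [if_neg (by exact_mod_cast hc)]
        rw [show decide (n % 10 < n / 10 % 10) = false by simp [hc]]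
        rw [Bool.false_or]
        have := ih (n / 10) (Nat.div_lt_self (by omega) (by omega)) (i / 10)
          (by omega) (by omega)
        rw [hfm, heq2] at this
        exact this

-- ===== VERDICT (by name: the statement is the Claim_ definition above) =====
theorem hasDecreasing_spec : Claim_equal_hasDecreasing := by
  intro i _
  unfold Spec_hasDecreasing hasDecreasing hasDecreasing_alt
  by_cases hi : i ≤ 0
  · rw [if_pos hi, hdLoop.eq_def, dif_neg (by omega)]
  · rw [if_neg hi]
    rw [PySem.Int.toList_toStr]
    have hpos : 0 < i := by omega
    rw [hdLoop_eq i.toNat i hpos rfl]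
    simp only [PySem.Int.toChars, if_neg (by omega : ¬ i < 0), toDigits_eq]
    exact (zipAny_chs i.toNat).symm
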